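-- pv_equiv track=rewrite | github.com/shreeyapoojari29/michigan.py | py42.Anagram.py | find_largest_anagram_groups
-- ===== SOURCE A (Python) =====
-- def find_largest_anagram_groups(anagram_dict):
--
--     max_size = 0
--     largest_groups = []
--
--     for group in anagram_dict.values():
--         if len(group) > max_size:
--             max_size = len(group)
--             largest_groups = [group]
--         elif len(group) == max_size:
--             largest_groups.append(group)
--
--     return largest_groups
-- ===== SOURCE B (Python) =====
-- def find_largest_anagram_groups(anagram_dict):
--     max_size = max((len(g) for g in anagram_dict.values()), default=0)
--     return [g for g in anagram_dict.values() if len(g) == max_size]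
-- ===== Notes on version B (the rewrite author's own statement) =====
-- stated objective: simpler
-- what changed: Replaces the single adaptive pass that tracks a running max and resets/extends the accumulator with a two-pass compute-then-filter: first max of group lengths (default 0), then a comprehension keeping groups of that length.
import Mathlib
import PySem

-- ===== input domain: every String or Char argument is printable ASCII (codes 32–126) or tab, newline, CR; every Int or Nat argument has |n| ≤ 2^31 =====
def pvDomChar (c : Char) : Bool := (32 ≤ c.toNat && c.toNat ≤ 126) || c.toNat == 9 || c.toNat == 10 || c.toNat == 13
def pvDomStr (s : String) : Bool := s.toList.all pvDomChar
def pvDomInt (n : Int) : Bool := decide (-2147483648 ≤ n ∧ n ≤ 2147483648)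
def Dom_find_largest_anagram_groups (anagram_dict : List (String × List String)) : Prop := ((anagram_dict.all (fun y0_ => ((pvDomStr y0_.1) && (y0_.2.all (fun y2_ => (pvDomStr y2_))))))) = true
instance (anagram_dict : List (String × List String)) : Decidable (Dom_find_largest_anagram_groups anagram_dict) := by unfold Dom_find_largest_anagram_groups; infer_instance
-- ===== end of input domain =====

-- B replaces A's single adaptive pass (running max, list reset on a new max) by two passes:
-- compute the maximum group length, then filter the values to the groups of that length.

-- ===== PORT A =====
-- the loop body: if len(group) > max_size: reset; elif len(group) == max_size: append
def pvStepA (st : Nat × List (List String)) (group : List String) : Nat × List (List String) :=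
  if st.1 < group.length then (group.length, [group])
  else if group.length = st.1 then (st.1, st.2 ++ [group])
  else st

def find_largest_anagram_groups (anagram_dict : List (String × List String)) : List (List String) :=
  ((anagram_dict.map Prod.snd).foldl pvStepA (0, [])).2

-- ===== PORT B =====
def find_largest_anagram_groups_alt (anagram_dict : List (String × List String)) : List (List String) :=
  let vals := anagram_dict.map Prod.snd
  let max_size := vals.foldl (fun m g => Nat.max m g.length) 0
  vals.filter (fun g => g.length == max_size)

-- ===== PRECONDITION & SPEC =====
def Spec_find_largest_anagram_groups (anagram_dict : List (String × List String)) (out : List (List String)) : Prop := out = find_largest_anagram_groups_alt anagram_dict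
instance (anagram_dict : List (String × List String)) (out : List (List String)) : Decidable (Spec_find_largest_anagram_groups anagram_dict out) := by unfold Spec_find_largest_anagram_groups; infer_instance

-- ===== CLAIM (what is proved, stated in full; the proofs are below) =====
def Claim_equal_find_largest_anagram_groups : Prop := ∀ (anagram_dict : List (String × List String)), Dom_find_largest_anagram_groups anagram_dict → Spec_find_largest_anagram_groups anagram_dict (find_largest_anagram_groups anagram_dict)

-- ===== LEMMAS AND PROOFS =====

-- the maximum computed by B's first pass
def pvMaxLen (vs : List (List String)) : Nat := vs.foldl (fun m g => Nat.max m g.length) 0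

lemma pvMaxLen_append (vs : List (List String)) (g : List String) :
    pvMaxLen (vs ++ [g]) = Nat.max (pvMaxLen vs) g.length := by
  simp [pvMaxLen, List.foldl_append]

lemma pvMaxLen_le (vs : List (List String)) (g : List String) (h : g ∈ vs) :
    g.length ≤ pvMaxLen vs := by
  induction vs using List.reverseRecOn with
  | nil => cases h
  | append_singleton xs x ih =>
    rw [pvMaxLen_append]
    rcases List.mem_append.mp h with h' | h'
    · exact le_trans (ih h') (Nat.le_max_left _ _)
    · simp at h'; subst h'; exact Nat.le_max_right _ _

lemma pvLoopA_eq (vs : List (List String)) :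
    vs.foldl pvStepA (0, []) = (pvMaxLen vs, vs.filter (fun g => g.length == pvMaxLen vs)) := by
  induction vs using List.reverseRecOn with
  | nil => simp [pvMaxLen]
  | append_singleton xs g ih =>
    rw [List.foldl_append, ih, pvMaxLen_append]
    by_cases hgt : pvMaxLen xs < g.length
    · have hmax : Nat.max (pvMaxLen xs) g.length = g.length := Nat.max_eq_right (le_of_lt hgt)
      have hfil : xs.filter (fun x => x.length == g.length) = [] := by
        rw [List.filter_eq_nil_iff]
        intro x hx hbe
        have := pvMaxLen_le xs x hx
        simp at hbe
        omega
      simp [pvStepA, hgt, hmax, List.filter_append, hfil]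
    · have hmax : Nat.max (pvMaxLen xs) g.length = pvMaxLen xs :=
        Nat.max_eq_left (by omega)
      by_cases heq : g.length = pvMaxLen xs
      · simp [pvStepA, heq, List.filter_append]
      · simp [pvStepA, hgt, heq, hmax, List.filter_append]

-- ===== VERDICT (by name: the statement is the Claim_ definition above) =====
theorem find_largest_anagram_groups_spec : Claim_equal_find_largest_anagram_groups := by
  intro d _
  show find_largest_anagram_groups d = find_largest_anagram_groups_alt d
  simp [find_largest_anagram_groups, find_largest_anagram_groups_alt, pvLoopA_eq, pvMaxLen]
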